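-- pv_equiv track=rewrite | github.com/Kamisato520/DataEvolver | v6_staging/run_evolution_loop.py | _aggregate_baseline_diagnostics
-- ===== SOURCE A (Python) =====
-- from collections import Counter
--
-- def _aggregate_baseline_diagnostics(diag_list: list) -> dict:
--     """
--     Aggregate diagnostics across 2-3 baseline probes.
--
--     Rules:
--     - structure_consistency: worst-case
--     - physics_consistency: worst-case
--     - color_consistency: majority vote
--     - lighting_diagnosis: majority vote
--     """
--     if not diag_list:
--         return {}
--
--     struct_vals = [d.get("structure_consistency", "good") for d in diag_list]
--     if "major_mismatch" in struct_vals: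
--         agg_structure = "major_mismatch"
--     elif "minor_mismatch" in struct_vals:
--         agg_structure = "minor_mismatch"
--     else:
--         agg_structure = "good"
--
--     phys_vals = [d.get("physics_consistency", "good") for d in diag_list]
--     if "major_issue" in phys_vals:
--         agg_physics = "major_issue"
--     elif "minor_issue" in phys_vals:
--         agg_physics = "minor_issue"
--     else:
--         agg_physics = "good"
--
--     color_vals = [d.get("color_consistency", "good") for d in diag_list]
--     agg_color = Counter(color_vals).most_common(1)[0][0]
--
--     light_vals = [d.get("lighting_diagnosis", "good") for d in diag_list]
--     agg_lighting = Counter(light_vals).most_common(1)[0][0]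
--
--     return {
--         "structure_consistency": agg_structure,
--         "physics_consistency": agg_physics,
--         "color_consistency": agg_color,
--         "lighting_diagnosis": agg_lighting,
--     }
-- ===== SOURCE B (Python) =====
-- _WORST = [
--     ("structure_consistency", ["good", "minor_mismatch", "major_mismatch"]),
--     ("physics_consistency", ["good", "minor_issue", "major_issue"]),
-- ]
-- _MAJORITY = ["color_consistency", "lighting_diagnosis"]
--
--
-- def _aggregate_baseline_diagnostics(diag_list: list) -> dict:
--     if not diag_list:
--         return {}
--     result = {}
--     for key, ladder in _WORST:
--         worst = 0
--         for d in diag_list: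
--             v = d.get(key, "good")
--             r = ladder.index(v) if v in ladder else 0
--             if worst < r:
--                 worst = r
--         result[key] = ladder[worst]
--     for key in _MAJORITY:
--         counts = {}
--         for d in diag_list:
--             v = d.get(key, "good")
--             counts[v] = counts.get(v, 0) + 1
--         best, best_n = "", 0
--         for v, n in counts.items():
--             if best_n < n:
--                 best, best_n = v, n
--         result[key] = best
--     return result
-- ===== Notes on version B (the rewrite author's own statement) =====
-- stated objective: simpler
-- what changed: Replaces the two hard-coded if/elif worst-case chains and the two Counter.most_common calls by one config-driven pass: a table maps each worst-case field to a severity ladder (rank via index, fold the max rank, index back), and each majority field to a manual count dict scanned once for the first strictly-greater leader (first-insertion tie-break, matching most_common).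
import Mathlib
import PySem

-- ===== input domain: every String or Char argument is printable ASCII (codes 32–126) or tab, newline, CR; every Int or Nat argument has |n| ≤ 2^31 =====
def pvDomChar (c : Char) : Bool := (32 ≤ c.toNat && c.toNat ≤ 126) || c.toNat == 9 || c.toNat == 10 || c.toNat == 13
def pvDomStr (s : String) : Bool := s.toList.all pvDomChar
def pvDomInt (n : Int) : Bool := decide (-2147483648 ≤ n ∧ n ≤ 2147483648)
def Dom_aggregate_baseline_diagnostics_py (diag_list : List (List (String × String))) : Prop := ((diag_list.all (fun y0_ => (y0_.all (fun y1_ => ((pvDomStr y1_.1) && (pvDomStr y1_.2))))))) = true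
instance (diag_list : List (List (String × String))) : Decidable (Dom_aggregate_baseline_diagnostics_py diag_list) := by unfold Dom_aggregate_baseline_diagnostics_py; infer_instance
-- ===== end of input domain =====

-- B replaces A's two hard-coded if/elif chains and two Counter.most_common calls by one
-- config-driven pass (severity-ladder max-rank fold for worst-case fields, a count dict
-- scanned once for the first strictly-greater leader for majority fields); objective: simpler.

-- ===== PORT A =====
-- d.get(k, dflt) on the association list (first match), shared by both ports
def pvGetD : List (String × String) → String → String → String
  | [], _, dflt => dflt
  | (k', v) :: rest, k, dflt => if k' == k then v else pvGetD rest k dflt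

-- Counter(vals).most_common(1)[0][0]: stable descending sort of the counter's items, head.
-- The [] branch is unreachable (every caller passes vals ≠ []; Python would raise IndexError there).
def pvMostCommon1 (vals : List String) : String :=
  match PySem.List.sorted (PySem.Dict.counter vals).items (fun p => p.2) true with
  | [] => ""
  | p :: _ => p.1

def aggregate_baseline_diagnostics_py (diag_list : List (List (String × String))) : List (String × String) :=
  if diag_list = [] then []
  else
    let struct_vals := diag_list.map (fun d => pvGetD d "structure_consistency" "good")
    let agg_structure :=
      if struct_vals.contains "major_mismatch" then "major_mismatch"
      else if struct_vals.contains "minor_mismatch" then "minor_mismatch"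
      else "good"
    let phys_vals := diag_list.map (fun d => pvGetD d "physics_consistency" "good")
    let agg_physics :=
      if phys_vals.contains "major_issue" then "major_issue"
      else if phys_vals.contains "minor_issue" then "minor_issue"
      else "good"
    let color_vals := diag_list.map (fun d => pvGetD d "color_consistency" "good")
    let agg_color := pvMostCommon1 color_vals
    let light_vals := diag_list.map (fun d => pvGetD d "lighting_diagnosis" "good")
    let agg_lighting := pvMostCommon1 light_vals
    [("structure_consistency", agg_structure), ("physics_consistency", agg_physics),
     ("color_consistency", agg_color), ("lighting_diagnosis", agg_lighting)]

-- ===== PORT B =====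
-- worst-case field: fold the max severity rank over the probes, then index the ladder
-- (`ladder.getD worst ""` is Python's ladder[worst]: worst is an index of ladder by construction)
def pvWorstCase (diag_list : List (List (String × String))) (key : String) (ladder : List String) : String :=
  let worst := diag_list.foldl (fun worst d =>
      let v := pvGetD d key "good"
      let r := if ladder.contains v then (PySem.List.index? ladder v).getD 0 else 0
      if worst < r then r else worst) 0
  ladder.getD worst ""

-- majority field: count dict in first-seen order, then first strictly-greater leader
def pvMajority (diag_list : List (List (String × String))) (key : String) : String :=
  let counts := diag_list.foldl (fun c d =>
      let v := pvGetD d key "good"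
      c.insert v (c.getD v 0 + 1)) (PySem.Dict.empty : PySem.Dict String Int)
  (counts.items.foldl (fun best p => if best.2 < p.2 then p else best) ("", (0 : Int))).1

def aggregate_baseline_diagnostics_py_alt (diag_list : List (List (String × String))) : List (String × String) :=
  if diag_list = [] then []
  else
    ([("structure_consistency", ["good", "minor_mismatch", "major_mismatch"]),
      ("physics_consistency", ["good", "minor_issue", "major_issue"])].map
        (fun kl => (kl.1, pvWorstCase diag_list kl.1 kl.2)))
    ++ (["color_consistency", "lighting_diagnosis"].map
        (fun k => (k, pvMajority diag_list k)))

-- ===== PRECONDITION & SPEC =====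
def Spec_aggregate_baseline_diagnostics_py (diag_list : List (List (String × String))) (out : List (String × String)) : Prop := out = aggregate_baseline_diagnostics_py_alt diag_list
instance (diag_list : List (List (String × String))) (out : List (String × String)) : Decidable (Spec_aggregate_baseline_diagnostics_py diag_list out) := by unfold Spec_aggregate_baseline_diagnostics_py; infer_instance

-- ===== CLAIM (what is proved, stated in full; the proofs are below) =====
def Claim_equal_aggregate_baseline_diagnostics_py : Prop := ∀ (diag_list : List (List (String × String))), Dom_aggregate_baseline_diagnostics_py diag_list → Spec_aggregate_baseline_diagnostics_py diag_list (aggregate_baseline_diagnostics_py diag_list)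

-- ===== LEMMAS AND PROOFS =====

-- B's max-rank fold over a [g, mi, ma] severity ladder computes A's if/elif chain as a rank
lemma pv_fold_rank {α : Type} (get : α → String) (g mi ma : String)
    (hgmi : g ≠ mi) (hgma : g ≠ ma) (hmima : mi ≠ ma) :
    ∀ (l : List α) (w : Nat),
      l.foldl (fun w x =>
          let v := get x
          let r := if ([g, mi, ma] : List String).contains v then
              (PySem.List.index? [g, mi, ma] v).getD 0 else 0
          if w < r then r else w) w
        = max w (if (l.map get).contains ma then 2
                 else if (l.map get).contains mi then 1 else 0) := by
  intro l
  induction l with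
  | nil => intro w; simp
  | cons x t ih =>
    intro w
    rw [List.foldl_cons, ih, List.map_cons]
    by_cases hma : get x = ma
    · rw [hma]
      simp [PySem.List.index?_eq_idxOf?, List.idxOf?, List.findIdx?_cons,
        hgma, hmima, Ne.symm hgma, Ne.symm hmima]
      split_ifs <;> omega
    · by_cases hmi : get x = mi
      · rw [hmi]
        simp [PySem.List.index?_eq_idxOf?, List.idxOf?, List.findIdx?_cons,
          hgmi, hmima, Ne.symm hgmi, Ne.symm hmima]
        split_ifs <;> omega
      · by_cases hg : get x = g
        · rw [hg]
          simp [PySem.List.index?_eq_idxOf?, List.idxOf?, List.findIdx?_cons,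
            Ne.symm hgmi, Ne.symm hgma, hgmi, hgma]
        · simp [PySem.List.index?_eq_idxOf?, List.idxOf?, List.findIdx?_cons,
            hma, hmi, hg, Ne.symm hma, Ne.symm hmi, Ne.symm hg]

-- component equality for the worst-case fields
lemma pv_worst_eq (diag_list : List (List (String × String))) (key g mi ma : String)
    (hgmi : g ≠ mi) (hgma : g ≠ ma) (hmima : mi ≠ ma) :
    pvWorstCase diag_list key [g, mi, ma]
      = (if (diag_list.map (fun d => pvGetD d key "good")).contains ma then ma
         else if (diag_list.map (fun d => pvGetD d key "good")).contains mi then mi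
         else g) := by
  show List.getD [g, mi, ma] (diag_list.foldl _ 0) "" = _
  rw [pv_fold_rank (fun d => pvGetD d key "good") g mi ma hgmi hgma hmima]
  split_ifs <;> simp [List.getD]

-- head of the stable descending insertion sort, one insertion
lemma pv_head?_insertBy {α : Type} (key : α → Int) (x : α) (acc : List α) :
    (PySem.List.insertBy (fun a b => decide (key b < key a)) x acc).head?
      = match acc.head? with
        | none => some x
        | some m => if key m < key x then some x else some m := by
  cases acc with
  | nil => simp [PySem.List.insertBy]
  | cons y ys =>
    by_cases h : key y < key x <;> simp [PySem.List.insertBy, h]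

lemma pv_head?_foldl_insertBy {α : Type} (key : α → Int) :
    ∀ (l : List α) (acc : List α),
      (l.foldl (fun acc x => PySem.List.insertBy (fun a b => decide (key b < key a)) x acc) acc).head?
        = l.foldl (fun acc x =>
            match acc with
            | none => some x
            | some m => if key m < key x then some x else some m) acc.head? := by
  intro l
  induction l with
  | nil => intro acc; rfl
  | cons x t ih =>
    intro acc
    rw [List.foldl_cons, List.foldl_cons, ih, pv_head?_insertBy]

-- head of sorted(…, reverse=True) is the first maximal element (max?'s fold)
lemma pv_head?_sorted_rev {α : Type} (key : α → Int) (l : List α) :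
    (PySem.List.sorted l key true).head? = PySem.List.max? l key := by
  rw [PySem.List.sorted_rev_eq_foldl_insertBy, PySem.List.max?, pv_head?_foldl_insertBy]
  rfl

-- max?'s fold from `some b` is B's scan from `b`
lemma pv_foldl_maxstep_some {α : Type} (key : α → Int) :
    ∀ (t : List α) (b : α),
      t.foldl (fun acc x =>
          match acc with
          | none => some x
          | some m => if key m < key x then some x else some m) (some b)
        = some (t.foldl (fun m x => if key m < key x then x else m) b) := by
  intro t
  induction t with
  | nil => intro b; rfl
  | cons x t ih =>
    intro b
    rw [List.foldl_cons, List.foldl_cons]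
    by_cases h : key b < key x <;> simp [h, ih]

-- B's count-dict loop over the probes is Counter of the extracted values
lemma pv_counts_eq {α : Type} (get : α → String) (l : List α) :
    l.foldl (fun c d =>
        let v := get d
        c.insert v (c.getD v 0 + 1)) (PySem.Dict.empty : PySem.Dict String Int)
      = PySem.Dict.counter (l.map get) := by
  rw [← PySem.Dict.foldl_insert_getD_add_one_eq_counter, List.foldl_map]

-- component equality for the majority fields
lemma pv_majority_eq (diag_list : List (List (String × String))) (key : String)
    (h : diag_list ≠ []) :
    pvMajority diag_list key
      = pvMostCommon1 (diag_list.map (fun d => pvGetD d key "good")) := by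
  have hv : diag_list.map (fun d => pvGetD d key "good") ≠ [] := by simpa using h
  unfold pvMajority pvMostCommon1
  show (List.foldl (fun best p => if best.2 < p.2 then p else best) ("", (0 : Int))
      (diag_list.foldl (fun c d =>
        let v := pvGetD d key "good"
        c.insert v (c.getD v 0 + 1)) (PySem.Dict.empty : PySem.Dict String Int)).items).1 = _
  rw [pv_counts_eq]
  set vals := diag_list.map (fun d => pvGetD d key "good") with hvals
  -- every count in the counter's items is at least 1
  have hpos : ∀ p ∈ (PySem.Dict.counter vals).items, (1 : Int) ≤ p.2 := by
    intro p hp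
    rw [PySem.Dict.items_counter] at hp
    obtain ⟨k, hk, rfl⟩ := List.mem_map.mp hp
    have : k ∈ vals := (PySem.Set.mem_ofList vals k).mp hk
    have := List.count_pos_iff.mpr this
    simpa using this
  -- the counter's items list is nonempty
  have hitems : (PySem.Dict.counter vals).items ≠ [] := by
    rw [PySem.Dict.items_counter]
    obtain ⟨v, vs, hV⟩ : ∃ v vs, vals = v :: vs := by
      cases hvv : vals with
      | nil => exact absurd hvv hv
      | cons v vs => exact ⟨v, vs, rfl⟩
    have hmem : v ∈ PySem.Set.ofList vals := (PySem.Set.mem_ofList vals v).mpr (by simp [hV])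
    intro he
    rw [List.map_eq_nil_iff] at he
    rw [he] at hmem
    exact List.not_mem_nil hmem
  cases hl : (PySem.Dict.counter vals).items with
  | nil => exact absurd hl hitems
  | cons p t =>
    have hp1 : (1 : Int) ≤ p.2 := hpos p (by rw [hl]; exact List.mem_cons_self ..)
    have hmax : PySem.List.max? (PySem.Dict.counter vals).items (fun q => q.2)
        = some (t.foldl (fun m x => if m.2 < x.2 then x else m) p) := by
      rw [hl]
      show List.foldl _ (some p) t = _
      exact pv_foldl_maxstep_some _ t p
    have hsorted := pv_head?_sorted_rev (fun q : String × Int => q.2) (PySem.Dict.counter vals).items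
    rw [hmax] at hsorted
    cases hs : PySem.List.sorted (PySem.Dict.counter vals).items (fun q => q.2) true with
    | nil =>
      rw [PySem.List.sorted_eq_nil_iff] at hs
      exact absurd hs hitems
    | cons q t' =>
      rw [hs] at hsorted
      simp only [List.head?_cons, Option.some.injEq] at hsorted
      rw [hl] at hs
      rw [hs, hsorted]
      simp only [List.foldl_cons]
      rw [show (if (("", (0 : Int)) : String × Int).2 < p.2 then p else ("", (0 : Int))) = p from if_pos (by omega)]

-- ===== VERDICT (by name: the statement is the Claim_ definition above) =====
theorem aggregate_baseline_diagnostics_py_spec : Claim_equal_aggregate_baseline_diagnostics_py := by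
  intro diag_list _
  unfold Spec_aggregate_baseline_diagnostics_py
  by_cases h : diag_list = []
  · simp [aggregate_baseline_diagnostics_py, aggregate_baseline_diagnostics_py_alt, h]
  · simp only [aggregate_baseline_diagnostics_py, aggregate_baseline_diagnostics_py_alt, if_neg h,
      List.map_cons, List.map_nil, List.cons_append, List.nil_append]
    rw [pv_worst_eq diag_list _ "good" "minor_mismatch" "major_mismatch" (by decide) (by decide) (by decide),
        pv_worst_eq diag_list _ "good" "minor_issue" "major_issue" (by decide) (by decide) (by decide),
        pv_majority_eq diag_list _ h, pv_majority_eq diag_list _ h]
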